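-- pv_equiv track=rewrite | github.com/stefaccou/tensormet | src/tensormet/utils.py | linked_factor_groups
-- ===== SOURCE A (Python) =====
-- from collections import defaultdict
--
-- def linked_factor_groups(num_factors: int, shared_factors=None) -> list[list[int]]:
--     """
--     Convert pairwise links like {(1,2), (2,3)} into connected groups:
--     [[1,2,3], [0], ...]
--     """
--     parent = list(range(num_factors))
--
--     def find(x):
--         while parent[x] != x:
--             parent[x] = parent[parent[x]]
--             x = parent[x]
--         return x
--
--     def union(a, b):
--         ra, rb = find(a), find(b)
--         if ra != rb:
--             parent[rb] = ra
--
--     if shared_factors: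
--         for a, b in shared_factors:
--             if not (0 <= a < num_factors and 0 <= b < num_factors):
--                 raise ValueError(
--                     f"Invalid shared_factors entry {(a, b)} for {num_factors} factors."
--                 )
--             union(a, b)
--
--     groups = defaultdict(list)
--     for i in range(num_factors):
--         groups[find(i)].append(i)
--
--     return list(groups.values())
-- ===== SOURCE B (Python) =====
-- def linked_factor_groups(num_factors: int, shared_factors=None) -> list[list[int]]:
--     """Label propagation instead of union-find: keep a label per factor and
--     rewrite one whole label class at each link; then group by label."""
--     labels = list(range(num_factors))
--     if shared_factors:
--         for a, b in shared_factors: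
--             if not (0 <= a < num_factors and 0 <= b < num_factors):
--                 raise ValueError(
--                     f"Invalid shared_factors entry {(a, b)} for {num_factors} factors."
--                 )
--             la, lb = labels[a], labels[b]
--             if la != lb:
--                 labels = [la if l == lb else l for l in labels]
--     groups = {}
--     for i, l in enumerate(labels):
--         groups.setdefault(l, []).append(i)
--     return list(groups.values())
-- ===== Notes on version B (the rewrite author's own statement) =====
-- stated objective: alternative
-- what changed: Replaces path-compressing union-find with label propagation: each factor carries a group label and every link rewrites one whole label class in a single list pass, then factors are grouped by final label; no parent forest, no find/union.
-- outside the precondition, e.g. on linked_factor_groups(2, [(0, 5)]): A raises ValueError, B raises ValueError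
import Mathlib
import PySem

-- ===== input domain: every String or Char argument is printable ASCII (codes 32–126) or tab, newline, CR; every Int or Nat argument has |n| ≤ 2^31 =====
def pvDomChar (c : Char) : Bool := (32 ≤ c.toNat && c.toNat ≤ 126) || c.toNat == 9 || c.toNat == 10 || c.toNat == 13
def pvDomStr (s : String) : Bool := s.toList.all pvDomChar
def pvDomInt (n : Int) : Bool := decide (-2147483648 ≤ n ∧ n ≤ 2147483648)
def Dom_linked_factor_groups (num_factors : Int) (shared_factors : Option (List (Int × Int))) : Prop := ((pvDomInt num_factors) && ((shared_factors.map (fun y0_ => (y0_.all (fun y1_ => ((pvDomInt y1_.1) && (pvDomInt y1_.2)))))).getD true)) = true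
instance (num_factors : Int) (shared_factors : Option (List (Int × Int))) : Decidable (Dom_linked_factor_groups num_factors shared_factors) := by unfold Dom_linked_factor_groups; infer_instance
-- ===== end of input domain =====

-- B replaces A's path-compressing union-find by label propagation (rewrite one whole
-- label class per link, then group by label); alternative algorithm, not claimed faster.

-- ===== PORT A =====
-- while parent[x] != x: parent[x] = parent[parent[x]]; x = parent[x]
-- fuel (= len(parent)+1 at each call) only makes the loop structurally terminating;
-- under pvInv (see lemmas) it is never exhausted.
def pvFindA : Nat → List Int → Int → Int × List Int
  | 0, p, x => (x, p)
  | fuel+1, p, x =>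
    let px := PySem.List.pyGetD p x x
    if px = x then (x, p)
    else
      let gp := PySem.List.pyGetD p px px
      pvFindA fuel (PySem.List.pySetD p x gp) gp

def pvUnionA (p : List Int) (a b : Int) : List Int :=
  let fa := pvFindA (p.length + 1) p a
  let fb := pvFindA (fa.2.length + 1) fa.2 b
  if fa.1 ≠ fb.1 then PySem.List.pySetD fb.2 fb.1 fa.1 else fb.2

def linked_factor_groups (num_factors : Int) (shared_factors : Option (List (Int × Int))) : List (List Int) :=
  let parent0 := PySem.List.pyRange 0 num_factors 1
  let parent1 :=
    match shared_factors with
    | none => parent0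
    | some l =>
      if l = [] then parent0 else
      l.foldl (fun p e =>
        if 0 ≤ e.1 ∧ e.1 < num_factors ∧ 0 ≤ e.2 ∧ e.2 < num_factors then
          pvUnionA p e.1 e.2
        else p  -- Python raises ValueError here; such inputs are excluded by Pre_
        ) parent0
  let st := (PySem.List.pyRange 0 num_factors 1).foldl
    (fun (st : PySem.Dict Int (List Int) × List Int) i =>
      let fr := pvFindA (st.2.length + 1) st.2 i
      (st.1.modify fr.1 [] (fun g => g ++ [i]), fr.2))
    (PySem.Dict.empty, parent1)
  st.1.values

-- ===== PORT B =====
def linked_factor_groups_alt (num_factors : Int) (shared_factors : Option (List (Int × Int))) : List (List Int) :=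
  let labels0 := PySem.List.pyRange 0 num_factors 1
  let labels1 :=
    match shared_factors with
    | none => labels0
    | some l =>
      if l = [] then labels0 else
      l.foldl (fun lbs e =>
        if 0 ≤ e.1 ∧ e.1 < num_factors ∧ 0 ≤ e.2 ∧ e.2 < num_factors then
          let la := PySem.List.pyGetD lbs e.1 0
          let lb := PySem.List.pyGetD lbs e.2 0
          if la ≠ lb then lbs.map (fun v => if v = lb then la else v) else lbs
        else lbs  -- Python raises ValueError here; such inputs are excluded by Pre_
        ) labels0
  let groups := (PySem.List.enumerate labels1).foldl
    (fun (d : PySem.Dict Int (List Int)) il => d.modify il.2 [] (fun g => g ++ [il.1]))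
    PySem.Dict.empty
  groups.values

-- ===== PRECONDITION & SPEC =====
-- Pre_ excludes exactly the inputs on which Python A raises ValueError: a nonempty
-- shared_factors list containing an entry outside [0, num_factors) (B raises there too).
def Pre_linked_factor_groups (num_factors : Int) (shared_factors : Option (List (Int × Int))) : Prop :=
  ∀ e ∈ shared_factors.getD [], 0 ≤ e.1 ∧ e.1 < num_factors ∧ 0 ≤ e.2 ∧ e.2 < num_factors

instance (num_factors : Int) (shared_factors : Option (List (Int × Int))) : Decidable (Pre_linked_factor_groups num_factors shared_factors) := by unfold Pre_linked_factor_groups; infer_instance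

def pvWitness_linked_factor_groups : Int × (Option (List (Int × Int))) := (4, some [(0, 1), (1, 3)])

def Spec_linked_factor_groups (num_factors : Int) (shared_factors : Option (List (Int × Int))) (out : List (List Int)) : Prop := out = linked_factor_groups_alt num_factors shared_factors
instance (num_factors : Int) (shared_factors : Option (List (Int × Int))) (out : List (List Int)) : Decidable (Spec_linked_factor_groups num_factors shared_factors out) := by unfold Spec_linked_factor_groups; infer_instance

-- ===== CLAIM (what is proved, stated in full; the proofs are below) =====
def Claim_equal_linked_factor_groups : Prop := ∀ (num_factors : Int) (shared_factors : Option (List (Int × Int))), Dom_linked_factor_groups num_factors shared_factors → Pre_linked_factor_groups num_factors shared_factors → Spec_linked_factor_groups num_factors shared_factors (linked_factor_groups num_factors shared_factors)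

-- ===== LEMMAS AND PROOFS =====

-- parent-pointer reading used by A (and label reading used by B)
def pvPar (p : List Int) (x : Int) : Int := PySem.List.pyGetD p x x
def pvIter (p : List Int) (k : Nat) (x : Int) : Int := (pvPar p)^[k] x
def pvRoot (p : List Int) (x : Int) : Int := pvIter p p.length x
def pvRng (p : List Int) (x : Int) : Prop := 0 ≤ x ∧ x < p.length
def pvRngOk (p : List Int) : Prop := ∀ x, pvRng p x → pvRng p (pvPar p x)
def pvInv (p : List Int) : Prop := pvRngOk p ∧ ∀ x, pvRng p x → pvPar p (pvRoot p x) = pvRoot p x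
def pvLab (L : List Int) (i : Int) : Int := PySem.List.pyGetD L i 0
def pvKeyInv (p L : List Int) : Prop := L.length = p.length ∧
  ∀ i j, pvRng p i → pvRng p j → (pvRoot p i = pvRoot p j ↔ pvLab L i = pvLab L j)

lemma pvExFix (p : List Int) (x : Int) (hI : pvInv p) (hx : pvRng p x) :
    ∃ k, pvPar p (pvIter p k x) = pvIter p k x := ⟨p.length, hI.2 x hx⟩

lemma pvIter_succ (p : List Int) (k : Nat) (x : Int) :
    pvIter p (k+1) x = pvIter p k (pvPar p x) := by
  simp [pvIter, Function.iterate_succ_apply]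

lemma pvIter_succ' (p : List Int) (k : Nat) (x : Int) :
    pvIter p (k+1) x = pvPar p (pvIter p k x) := by
  simp [pvIter, Function.iterate_succ_apply']

lemma pvIter_add (p : List Int) (m k : Nat) (x : Int) :
    pvIter p (m + k) x = pvIter p m (pvIter p k x) := by
  simp [pvIter, Function.iterate_add_apply]

lemma pvRng_iter (p : List Int) (hR : pvRngOk p) (x : Int) (hx : pvRng p x) (k : Nat) :
    pvRng p (pvIter p k x) := by
  induction k with
  | zero => exact hx
  | succ k ih => rw [pvIter_succ']; exact hR _ ih

lemma pvIter_fix (p : List Int) (r : Int) (h : pvPar p r = r) (k : Nat) :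
    pvIter p k r = r := by
  induction k with
  | zero => rfl
  | succ k ih => rw [pvIter_succ', ih, h]

lemma pvRoot_of_fix (p : List Int) (x : Int) (h : pvPar p x = x) : pvRoot p x = x :=
  pvIter_fix p x h p.length

lemma pvRoot_unique (p : List Int) (x r : Int) (hI : pvInv p) (hx : pvRng p x)
    (k : Nat) (hk : pvIter p k x = r) (hr : pvPar p r = r) : pvRoot p x = r := by
  by_cases hle : k ≤ p.length
  · have : pvRoot p x = pvIter p (p.length - k + k) x := by
      unfold pvRoot; congr 1; omega
    rw [this, pvIter_add, hk, pvIter_fix p r hr]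
  · have h1 : pvIter p (k - p.length + p.length) x = r := by
      rw [show k - p.length + p.length = k by omega]
      exact hk
    rw [pvIter_add, show pvIter p p.length x = pvRoot p x from rfl,
      pvIter_fix p (pvRoot p x) (hI.2 x hx)] at h1
    exact h1

lemma pvRoot_par (p : List Int) (x : Int) (hI : pvInv p) (hx : pvRng p x) :
    pvRoot p (pvPar p x) = pvRoot p x := by
  have h1 : pvRoot p (pvPar p x) = pvIter p (p.length + 1) x := by
    rw [pvIter_succ]; rfl
  rw [h1, pvIter_succ']
  exact hI.2 x hx

lemma pvRoot_iter (p : List Int) (x : Int) (hI : pvInv p) (hx : pvRng p x) (k : Nat) :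
    pvRoot p (pvIter p k x) = pvRoot p x := by
  induction k with
  | zero => rfl
  | succ k ih =>
    rw [pvIter_succ', pvRoot_par p _ hI (pvRng_iter p hI.1 x hx k), ih]

lemma pvRoot_rng (p : List Int) (x : Int) (hI : pvInv p) (hx : pvRng p x) :
    pvRng p (pvRoot p x) := pvRng_iter p hI.1 x hx p.length

lemma pvRoot_idem (p : List Int) (x : Int) (hI : pvInv p) (hx : pvRng p x) :
    pvRoot p (pvRoot p x) = pvRoot p x := pvRoot_of_fix p _ (hI.2 x hx)

-- minimality of Nat.find: iterates strictly before the first fixpoint are pairwise distinct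
lemma pvIter_inj_below (p : List Int) (x : Int)
    (h : ∃ k, pvPar p (pvIter p k x) = pvIter p k x) (i j : Nat)
    (hij : i < j) (hj : j ≤ Nat.find h) : pvIter p i x ≠ pvIter p j x := by
  intro heq
  have hkey : pvIter p (Nat.find h - j + i) x = pvIter p (Nat.find h) x := by
    rw [pvIter_add, heq, ← pvIter_add, show Nat.find h - j + j = Nat.find h by omega]
  have hp : pvPar p (pvIter p (Nat.find h - j + i) x) = pvIter p (Nat.find h - j + i) x := by
    rw [hkey]; exact Nat.find_spec h
  exact Nat.find_min h (by omega) hp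

-- pigeonhole: an in-range pointer list that reaches a fixpoint does so within length steps
lemma pvSteps_le_len (p : List Int) (x : Int) (hR : pvRngOk p) (hx : pvRng p x)
    (h : ∃ k, pvPar p (pvIter p k x) = pvIter p k x) : Nat.find h ≤ p.length := by
  by_contra hgt
  push_neg at hgt
  have hinj : Set.InjOn (fun m : Fin (Nat.find h + 1) => pvIter p m x)
      ↑(Finset.univ : Finset (Fin (Nat.find h + 1))) := by
    intro i _ j _ hij
    by_contra hne
    have hne' : (i : Nat) ≠ (j : Nat) := fun hc => hne (Fin.ext hc)
    rcases Nat.lt_or_ge i j with hlt | hge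
    · exact pvIter_inj_below p x h i j hlt (Nat.le_of_lt_succ j.isLt) hij
    · exact pvIter_inj_below p x h j i (lt_of_le_of_ne hge (Ne.symm hne'))
        (Nat.le_of_lt_succ i.isLt) hij.symm
  have hmaps : Set.MapsTo (fun m : Fin (Nat.find h + 1) => pvIter p m x)
      ↑(Finset.univ : Finset (Fin (Nat.find h + 1))) ↑(Finset.Ico (0:ℤ) (p.length:ℤ)) := by
    intro m _
    have hm := pvRng_iter p hR x hx m
    simp only [Finset.coe_Ico, Set.mem_Ico]
    exact ⟨hm.1, hm.2⟩
  have hcard := Finset.card_le_card_of_injOn _ hmaps hinj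
  simp only [Finset.card_univ, Fintype.card_fin, Int.card_Ico] at hcard
  omega

lemma pvInv_rebuild (p : List Int) (hR : pvRngOk p)
    (hex : ∀ x, pvRng p x → ∃ k, pvPar p (pvIter p k x) = pvIter p k x) : pvInv p := by
  refine ⟨hR, fun x hx => ?_⟩
  have h := hex x hx
  have hfix := Nat.find_spec h
  have hle : Nat.find h ≤ p.length := pvSteps_le_len p x hR hx h
  have hroot : pvRoot p x = pvIter p (Nat.find h) x := by
    unfold pvRoot
    rw [show p.length = p.length - Nat.find h + Nat.find h by omega, pvIter_add,
      pvIter_fix p _ hfix]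
  rw [hroot]; exact hfix

lemma pvFind_par (p : List Int) (y : Int) (hI : pvInv p) (hy : pvRng p y)
    (hnf : pvPar p y ≠ y) :
    Nat.find (pvExFix p (pvPar p y) hI (hI.1 y hy)) ≤ Nat.find (pvExFix p y hI hy) - 1 := by
  have h1 : 1 ≤ Nat.find (pvExFix p y hI hy) := by
    rcases Nat.eq_zero_or_pos (Nat.find (pvExFix p y hI hy)) with h0 | h0
    · exfalso
      have hs := Nat.find_spec (pvExFix p y hI hy)
      rw [h0] at hs
      exact hnf (by simpa [pvIter] using hs)
    · exact h0
  apply Nat.find_min'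
  have : pvIter p (Nat.find (pvExFix p y hI hy) - 1) (pvPar p y)
      = pvIter p (Nat.find (pvExFix p y hI hy)) y := by
    rw [← pvIter_succ, show Nat.find (pvExFix p y hI hy) - 1 + 1 = Nat.find (pvExFix p y hI hy) by omega]
  rw [this]
  exact Nat.find_spec (pvExFix p y hI hy)

lemma pvRng_set (p : List Int) (t v z : Int) :
    pvRng (PySem.List.pySetD p t v) z ↔ pvRng p z := by
  unfold pvRng
  rw [PySem.List.length_pySetD]

lemma pvPar_set (p : List Int) (t v z : Int) (ht : pvRng p t) (hz : pvRng p z) :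
    pvPar (PySem.List.pySetD p t v) z = if z = t then v else pvPar p z := by
  obtain ⟨ht0, ht1⟩ := ht
  obtain ⟨hz0, hz1⟩ := hz
  unfold pvPar PySem.List.pyGetD
  rw [PySem.List.pySetD_of_nonneg p v ht0, PySem.List.pyGet?_of_nonneg _ hz0,
    PySem.List.pyGet?_of_nonneg _ hz0, List.getElem?_set]
  have htl : t.toNat < p.length := by omega
  by_cases hzt : z = t
  · simp [hzt, htl]
  · have : ¬ (t.toNat = z.toNat) := by omega
    simp [this, hzt]

lemma pvIter_set_avoid (p : List Int) (t v x : Int) (hR : pvRngOk p)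
    (ht : pvRng p t) (hx : pvRng p x)
    (havoid : ∀ m, pvIter p m x ≠ t) (k : Nat) :
    pvIter (PySem.List.pySetD p t v) k x = pvIter p k x := by
  induction k with
  | zero => rfl
  | succ k ih =>
    rw [pvIter_succ', pvIter_succ', ih, pvPar_set p t v _ ht (pvRng_iter p hR x hx k)]
    simp [havoid k]

-- the workhorse: a single pointer rewrite p[t] := v, where v's chain avoids t and
-- either v lies in t's class or t is a root, keeps pvInv and redirects t's class to root(v)
lemma pvEdit (p : List Int) (t v : Int) (hI : pvInv p) (ht : pvRng p t) (hv : pvRng p v)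
    (havoid : ∀ m, pvIter p m v ≠ t)
    (hcase : pvRoot p v = pvRoot p t ∨ pvPar p t = t) :
    pvInv (PySem.List.pySetD p t v) ∧
    ∀ y, pvRng p y → pvRoot (PySem.List.pySetD p t v) y =
      (if pvRoot p y = pvRoot p t then pvRoot p v else pvRoot p y) := by
  set q := PySem.List.pySetD p t v with hq
  have hrngq : ∀ z, pvRng q z ↔ pvRng p z := fun z => pvRng_set p t v z
  have hpar : ∀ z, pvRng p z → pvPar q z = if z = t then v else pvPar p z :=
    fun z hz => pvPar_set p t v z ht hz
  have hiterv : ∀ k, pvIter q k v = pvIter p k v :=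
    pvIter_set_avoid p t v v hI.1 ht hv havoid
  have hrootv_ne : pvRoot p v ≠ t := fun hc => havoid p.length hc
  have hfixv : pvPar q (pvRoot p v) = pvRoot p v := by
    rw [hpar _ (pvRoot_rng p v hI hv)]
    simp [hrootv_ne, hI.2 v hv]
  have hroot_ne : ∀ y, pvRng p y → pvRoot p y ≠ pvRoot p t → pvRoot p y ≠ t := by
    intro y hy hc he
    apply hc
    calc pvRoot p y = pvRoot p (pvRoot p y) := (pvRoot_idem p y hI hy).symm
    _ = pvRoot p t := by rw [he]
  have htarget_fix : ∀ y, pvRng p y →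
      pvPar q (if pvRoot p y = pvRoot p t then pvRoot p v else pvRoot p y)
      = (if pvRoot p y = pvRoot p t then pvRoot p v else pvRoot p y) := by
    intro y hy
    by_cases hc : pvRoot p y = pvRoot p t
    · simp [hc, hfixv]
    · simp only [hc, if_false]
      rw [hpar _ (pvRoot_rng p y hI hy)]
      simp [hroot_ne y hy hc, hI.2 y hy]
  have hcaset : ∀ y, pvRng p y → pvPar p y = y → y ≠ t → pvRoot p y = pvRoot p t →
      (if pvRoot p y = pvRoot p t then pvRoot p v else pvRoot p y) = y := by
    intro y hy hfix hyt hc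
    rcases hcase with hc1 | hc2
    · rw [if_pos hc, hc1, ← hc, pvRoot_of_fix p y hfix]
    · exfalso
      apply hyt
      rw [← pvRoot_of_fix p y hfix, hc, pvRoot_of_fix p t hc2]
  have hreach : ∀ K y, ∀ (hy : pvRng p y), Nat.find (pvExFix p y hI hy) ≤ K →
      ∃ m, pvIter q m y = (if pvRoot p y = pvRoot p t then pvRoot p v else pvRoot p y) := by
    intro K
    induction K with
    | zero =>
      intro y hy hK
      have hfix : pvPar p y = y := by
        have hs := Nat.find_spec (pvExFix p y hI hy)
        rw [Nat.le_zero.mp hK] at hs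
        simpa [pvIter] using hs
      by_cases hyt : y = t
      · subst hyt
        refine ⟨p.length + 1, ?_⟩
        rw [pvIter_add]
        have h1 : pvIter q 1 y = v := by
          rw [pvIter_succ', show pvIter q 0 y = y from rfl, hpar y hy]
          simp
        rw [h1, hiterv p.length, if_pos rfl]
        rfl
      · by_cases hc : pvRoot p y = pvRoot p t
        · exact ⟨0, (hcaset y hy hfix hyt hc).symm⟩
        · refine ⟨0, ?_⟩
          rw [if_neg hc, pvRoot_of_fix p y hfix]
          rfl
    | succ K ih =>
      intro y hy hK
      by_cases hyt : y = t
      · subst hyt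
        refine ⟨p.length + 1, ?_⟩
        rw [pvIter_add]
        have h1 : pvIter q 1 y = v := by
          rw [pvIter_succ', show pvIter q 0 y = y from rfl, hpar y hy]
          simp
        rw [h1, hiterv p.length, if_pos rfl]
        rfl
      · by_cases hfix : pvPar p y = y
        · by_cases hc : pvRoot p y = pvRoot p t
          · exact ⟨0, (hcaset y hy hfix hyt hc).symm⟩
          · refine ⟨0, ?_⟩
            rw [if_neg hc, pvRoot_of_fix p y hfix]
            rfl
        · have hz : pvRng p (pvPar p y) := hI.1 y hy
          have hstep : Nat.find (pvExFix p (pvPar p y) hI hz) ≤ K := by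
            have := pvFind_par p y hI hy hfix
            omega
          obtain ⟨m, hm⟩ := ih (pvPar p y) hz hstep
          refine ⟨m + 1, ?_⟩
          rw [pvIter_succ, hpar y hy, if_neg hyt, hm,
            pvRoot_par p y hI hy]
  have hRq : pvRngOk q := by
    intro z hz
    rw [hrngq] at hz
    rw [hrngq, hpar z hz]
    by_cases hzt : z = t
    · simp [hzt, hv]
    · simp [hzt, hI.1 z hz]
  have hexq : ∀ z, pvRng q z → ∃ k, pvPar q (pvIter q k z) = pvIter q k z := by
    intro z hz
    rw [hrngq] at hz
    obtain ⟨m, hm⟩ := hreach (Nat.find (pvExFix p z hI hz)) z hz le_rfl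
    exact ⟨m, by rw [hm]; exact htarget_fix z hz⟩
  have hIq : pvInv q := pvInv_rebuild q hRq hexq
  refine ⟨hIq, fun y hy => ?_⟩
  obtain ⟨m, hm⟩ := hreach (Nat.find (pvExFix p y hI hy)) y hy le_rfl
  exact pvRoot_unique q y _ hIq ((hrngq y).mpr hy) m hm (htarget_fix y hy)

lemma pvFindA_fix (fuel : Nat) (p : List Int) (x : Int) (h : pvPar p x = x) :
    pvFindA (fuel+1) p x = (x, p) := by
  simp [pvFindA, pvPar] at h ⊢
  simp [h]

lemma pvFindA_step (fuel : Nat) (p : List Int) (x : Int) (h : pvPar p x ≠ x) :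
    pvFindA (fuel+1) p x
      = pvFindA fuel (PySem.List.pySetD p x (pvPar p (pvPar p x))) (pvPar p (pvPar p x)) := by
  simp only [pvFindA]
  exact if_neg h

lemma pvFind_spec (K : Nat) : ∀ (p : List Int) (x : Int) (fuel : Nat) (hI : pvInv p) (hx : pvRng p x),
    Nat.find (pvExFix p x hI hx) ≤ K → K < fuel →
    (pvFindA fuel p x).1 = pvRoot p x ∧ (pvFindA fuel p x).2.length = p.length ∧
    pvInv (pvFindA fuel p x).2 ∧
    ∀ y, pvRng p y → pvRoot (pvFindA fuel p x).2 y = pvRoot p y := by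
  induction K with
  | zero =>
    intro p x fuel hI hx hK hf
    obtain ⟨f, rfl⟩ : ∃ f, fuel = f + 1 := ⟨fuel - 1, by omega⟩
    have hfix : pvPar p x = x := by
      have hs := Nat.find_spec (pvExFix p x hI hx)
      rw [Nat.le_zero.mp hK] at hs
      simpa [pvIter] using hs
    rw [pvFindA_fix f p x hfix]
    exact ⟨(pvRoot_of_fix p x hfix).symm, rfl, hI, fun y _ => rfl⟩
  | succ K ih =>
    intro p x fuel hI hx hK hf
    obtain ⟨f, rfl⟩ : ∃ f, fuel = f + 1 := ⟨fuel - 1, by omega⟩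
    by_cases hfix : pvPar p x = x
    · rw [pvFindA_fix f p x hfix]
      exact ⟨(pvRoot_of_fix p x hfix).symm, rfl, hI, fun y _ => rfl⟩
    · rw [pvFindA_step f p x hfix]
      have hpx : pvRng p (pvPar p x) := hI.1 x hx
      have hgp : pvRng p (pvPar p (pvPar p x)) := hI.1 _ hpx
      have hgp2 : pvIter p 2 x = pvPar p (pvPar p x) := by
        simp [pvIter]
      have havoid : ∀ m, pvIter p m (pvPar p (pvPar p x)) ≠ x := by
        intro m hm
        rw [← hgp2, ← pvIter_add] at hm
        by_cases hle : m + 2 ≤ Nat.find (pvExFix p x hI hx)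
        · exact pvIter_inj_below p x (pvExFix p x hI hx) 0 (m+2) (by omega) hle (hm.symm)
        · have hs := Nat.find_spec (pvExFix p x hI hx)
          have hstable : pvIter p (m + 2) x = pvIter p (Nat.find (pvExFix p x hI hx)) x := by
            rw [show m + 2 = (m + 2 - Nat.find (pvExFix p x hI hx)) + Nat.find (pvExFix p x hI hx) by omega,
              pvIter_add, pvIter_fix p _ hs]
          rw [hstable] at hm
          rw [hm] at hs
          exact hfix hs
      have hcase : pvRoot p (pvPar p (pvPar p x)) = pvRoot p x := by
        rw [← hgp2, pvRoot_iter p x hI hx 2]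
      obtain ⟨hIq, hrootq⟩ := pvEdit p x (pvPar p (pvPar p x)) hI hx hgp havoid (Or.inl hcase)
      set q := PySem.List.pySetD p x (pvPar p (pvPar p x)) with hqdef
      have hlenq : q.length = p.length := PySem.List.length_pySetD p x _
      have hrngq : ∀ z, pvRng q z ↔ pvRng p z := fun z => pvRng_set p x _ z
      have hrootsq : ∀ y, pvRng p y → pvRoot q y = pvRoot p y := by
        intro y hy
        rw [hrootq y hy]
        split_ifs with hc
        · rw [hcase, hc]
        · rfl
      have hgpq : pvRng q (pvPar p (pvPar p x)) := (hrngq _).mpr hgp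
      -- fuel bound for the recursive call
      have hiterq : ∀ k, pvIter q k (pvPar p (pvPar p x)) = pvIter p k (pvPar p (pvPar p x)) :=
        pvIter_set_avoid p x _ _ hI.1 hx hgp havoid
      have hkgp : Nat.find (pvExFix p (pvPar p (pvPar p x)) hI hgp) ≤ K := by
        have h1 : Nat.find (pvExFix p (pvPar p x) hI hpx) ≤ Nat.find (pvExFix p x hI hx) - 1 :=
          pvFind_par p x hI hx hfix
        by_cases hfx2 : pvPar p (pvPar p x) = pvPar p x
        · -- px is a fixpoint, gp = px
          have : Nat.find (pvExFix p (pvPar p (pvPar p x)) hI hgp)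
              ≤ Nat.find (pvExFix p (pvPar p x) hI hpx) := by
            apply Nat.find_min'
            rw [hfx2]
            exact Nat.find_spec (pvExFix p (pvPar p x) hI hpx)
          omega
        · have h2 : Nat.find (pvExFix p (pvPar p (pvPar p x)) hI (hI.1 _ hpx))
              ≤ Nat.find (pvExFix p (pvPar p x) hI hpx) - 1 := pvFind_par p (pvPar p x) hI hpx hfx2
          omega
      have hkq : Nat.find (pvExFix q (pvPar p (pvPar p x)) hIq hgpq) ≤ K := by
        apply le_trans _ hkgp
        apply Nat.find_min'
        rw [hiterq]
        set w := pvIter p (Nat.find (pvExFix p (pvPar p (pvPar p x)) hI hgp)) (pvPar p (pvPar p x)) with hw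
        have hsw : pvPar p w = w := Nat.find_spec (pvExFix p (pvPar p (pvPar p x)) hI hgp)
        have hwrng : pvRng p w := pvRng_iter p hI.1 _ hgp _
        have hwx : w ≠ x := havoid _
        rw [pvPar_set p x _ w hx hwrng, if_neg hwx]
        exact hsw
      obtain ⟨r1, r2, r3, r4⟩ := ih q (pvPar p (pvPar p x)) f hIq hgpq hkq (by omega)
      refine ⟨?_, by rw [r2, hlenq], r3, ?_⟩
      · rw [r1, hrootsq _ hgp, hcase]
      · intro y hy
        rw [r4 y ((hrngq y).mpr hy), hrootsq y hy]

lemma pvUnion_spec (p : List Int) (a b : Int) (hI : pvInv p) (ha : pvRng p a) (hb : pvRng p b) :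
    (pvUnionA p a b).length = p.length ∧ pvInv (pvUnionA p a b) ∧
    ∀ y, pvRng p y → pvRoot (pvUnionA p a b) y =
      (if pvRoot p y = pvRoot p b then pvRoot p a else pvRoot p y) := by
  obtain ⟨f1, f2, f3, f4⟩ := pvFind_spec p.length p a (p.length + 1) hI ha
    (pvSteps_le_len p a hI.1 ha _) (by omega)
  rcases hfa : pvFindA (p.length + 1) p a with ⟨ra, p1⟩
  rw [hfa] at f1 f2 f3 f4
  simp only at f1 f2 f3 f4
  have hb1 : pvRng p1 b := by
    unfold pvRng
    rw [f2]
    exact hb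
  obtain ⟨g1, g2, g3, g4⟩ := pvFind_spec p1.length p1 b (p1.length + 1) f3 hb1
    (pvSteps_le_len p1 b f3.1 hb1 _) (by omega)
  rcases hfb : pvFindA (p1.length + 1) p1 b with ⟨rb, p2⟩
  rw [hfb] at g1 g2 g3 g4
  simp only at g1 g2 g3 g4
  have hU : pvUnionA p a b = if ra ≠ rb then PySem.List.pySetD p2 rb ra else p2 := by
    simp only [pvUnionA, hfa, hfb]
  have hrng1 : ∀ z, pvRng p1 z ↔ pvRng p z := by intro z; unfold pvRng; rw [f2]
  have hrng2 : ∀ z, pvRng p2 z ↔ pvRng p z := by intro z; unfold pvRng; rw [g2, f2]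
  have hroots2 : ∀ y, pvRng p y → pvRoot p2 y = pvRoot p y := by
    intro y hy
    rw [g4 y ((hrng1 y).mpr hy), f4 y hy]
  have hra : ra = pvRoot p a := f1
  have hrb : rb = pvRoot p b := by rw [g1, f4 b hb]
  rw [hU]
  by_cases hne : ra = rb
  · rw [if_neg (not_not_intro hne)]
    have hab : pvRoot p a = pvRoot p b := by rw [← hra, ← hrb, hne]
    refine ⟨by rw [g2, f2], g3, fun y hy => ?_⟩
    rw [hroots2 y hy]
    split_ifs with hcnd
    · rw [hab, hcnd]
    · rfl
  · rw [if_pos hne]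
    have hrbrng : pvRng p2 rb := by rw [hrng2, hrb]; exact pvRoot_rng p b hI hb
    have hrarng : pvRng p2 ra := by rw [hrng2, hra]; exact pvRoot_rng p a hI ha
    have hfixa : pvPar p2 ra = ra := by
      have h' : pvRoot p2 ra = ra := by
        rw [hroots2 ra ((hrng2 ra).mp hrarng), hra, pvRoot_idem p a hI ha]
      rw [← h']
      exact g3.2 _ hrarng
    have hfixb : pvPar p2 rb = rb := by
      have h' : pvRoot p2 rb = rb := by
        rw [hroots2 rb ((hrng2 rb).mp hrbrng), hrb, pvRoot_idem p b hI hb]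
      rw [← h']
      exact g3.2 _ hrbrng
    have havoid : ∀ m, pvIter p2 m ra ≠ rb := by
      intro m
      rw [pvIter_fix p2 ra hfixa m]
      exact hne
    obtain ⟨hIq, hrootq⟩ := pvEdit p2 rb ra g3 hrbrng hrarng havoid (Or.inr hfixb)
    refine ⟨by rw [PySem.List.length_pySetD, g2, f2], hIq, fun y hy => ?_⟩
    rw [hrootq y ((hrng2 y).mpr hy), hroots2 y hy,
      pvRoot_of_fix p2 rb hfixb, pvRoot_of_fix p2 ra hfixa, hra, hrb]

lemma pvLab_map (L : List Int) (f : Int → Int) (i : Int) (hi : 0 ≤ i) (hl : i < L.length) :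
    pvLab (L.map f) i = f (pvLab L i) := by
  unfold pvLab PySem.List.pyGetD
  rw [PySem.List.pyGet?_of_nonneg _ hi, PySem.List.pyGet?_of_nonneg _ hi, List.getElem?_map]
  have : i.toNat < L.length := by omega
  rw [List.getElem?_eq_getElem this]
  simp

lemma pvStep (p L : List Int) (n a b : Int) (hI : pvInv p) (hK : pvKeyInv p L)
    (ha : pvRng p a) (hb : pvRng p b) :
    pvInv (pvUnionA p a b) ∧ pvKeyInv (pvUnionA p a b)
      (if pvLab L a ≠ pvLab L b then L.map (fun v => if v = pvLab L b then pvLab L a else v) else L) := by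
  obtain ⟨u1, u2, u3⟩ := pvUnion_spec p a b hI ha hb
  refine ⟨u2, ?_, ?_⟩
  · -- lengths
    split_ifs with hlab
    · rw [List.length_map, hK.1, u1]
    · rw [hK.1, u1]
  · intro i j hi hj
    rw [pvRng] at hi hj
    rw [u1] at hi hj
    have hi' : pvRng p i := hi
    have hj' : pvRng p j := hj
    rw [u3 i hi', u3 j hj']
    by_cases hlab : pvLab L a = pvLab L b
    · rw [if_neg (not_not_intro hlab)]
      have hab : pvRoot p a = pvRoot p b := (hK.2 a b ha hb).mpr hlab
      have e1 : (if pvRoot p i = pvRoot p b then pvRoot p a else pvRoot p i) = pvRoot p i := by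
        split_ifs with hc
        · rw [hab, hc]
        · rfl
      have e2 : (if pvRoot p j = pvRoot p b then pvRoot p a else pvRoot p j) = pvRoot p j := by
        split_ifs with hc
        · rw [hab, hc]
        · rfl
      rw [e1, e2]
      exact hK.2 i j hi' hj'
    · rw [if_pos hlab]
      have hLi : 0 ≤ i ∧ i < L.length := by rw [hK.1]; exact hi'
      have hLj : 0 ≤ j ∧ j < L.length := by rw [hK.1]; exact hj'
      rw [pvLab_map L _ i hLi.1 hLi.2, pvLab_map L _ j hLj.1 hLj.2]
      have hib := hK.2 i b hi' hb
      have hjb := hK.2 j b hj' hb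
      have hia := hK.2 i a hi' ha
      have hja := hK.2 j a hj' ha
      have hij := hK.2 i j hi' hj'
      have haj := hK.2 a j ha hj'
      have hai := hK.2 a i ha hi'
      show _ ↔ (if pvLab L i = pvLab L b then pvLab L a else pvLab L i)
          = (if pvLab L j = pvLab L b then pvLab L a else pvLab L j)
      by_cases h1 : pvRoot p i = pvRoot p b <;> by_cases h2 : pvRoot p j = pvRoot p b
      · have l1 : pvLab L i = pvLab L b := hib.mp h1
        have l2 : pvLab L j = pvLab L b := hjb.mp h2
        rw [if_pos h1, if_pos h2, if_pos l1, if_pos l2]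
        simp
      · have l1 : pvLab L i = pvLab L b := hib.mp h1
        have l2 : ¬ pvLab L j = pvLab L b := fun hc => h2 (hjb.mpr hc)
        rw [if_pos h1, if_neg h2, if_pos l1, if_neg l2]
        exact haj
      · have l1 : ¬ pvLab L i = pvLab L b := fun hc => h1 (hib.mpr hc)
        have l2 : pvLab L j = pvLab L b := hjb.mp h2
        rw [if_neg h1, if_pos h2, if_neg l1, if_pos l2]
        exact hia
      · have l1 : ¬ pvLab L i = pvLab L b := fun hc => h1 (hib.mpr hc)
        have l2 : ¬ pvLab L j = pvLab L b := fun hc => h2 (hjb.mpr hc)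
        rw [if_neg h1, if_neg h2, if_neg l1, if_neg l2]
        exact hij

lemma pvEdges (n : Int) (l : List (Int × Int)) : ∀ (p L : List Int), pvInv p → pvKeyInv p L →
    p.length = n.toNat →
    pvInv (l.foldl (fun p e =>
        if 0 ≤ e.1 ∧ e.1 < n ∧ 0 ≤ e.2 ∧ e.2 < n then pvUnionA p e.1 e.2 else p) p) ∧
    (l.foldl (fun p e =>
        if 0 ≤ e.1 ∧ e.1 < n ∧ 0 ≤ e.2 ∧ e.2 < n then pvUnionA p e.1 e.2 else p) p).length = n.toNat ∧
    pvKeyInv (l.foldl (fun p e =>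
        if 0 ≤ e.1 ∧ e.1 < n ∧ 0 ≤ e.2 ∧ e.2 < n then pvUnionA p e.1 e.2 else p) p)
      (l.foldl (fun lbs e =>
        if 0 ≤ e.1 ∧ e.1 < n ∧ 0 ≤ e.2 ∧ e.2 < n then
          let la := PySem.List.pyGetD lbs e.1 0
          let lb := PySem.List.pyGetD lbs e.2 0
          if la ≠ lb then lbs.map (fun v => if v = lb then la else v) else lbs
        else lbs) L) := by
  induction l with
  | nil => intro p L hI hK hlen; exact ⟨hI, hlen, hK⟩
  | cons e l ih =>
    intro p L hI hK hlen
    rw [List.foldl_cons, List.foldl_cons]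
    by_cases hval : 0 ≤ e.1 ∧ e.1 < n ∧ 0 ≤ e.2 ∧ e.2 < n
    · rw [if_pos hval, if_pos hval]
      have ha : pvRng p e.1 := ⟨hval.1, by rw [hlen]; omega⟩
      have hb : pvRng p e.2 := ⟨hval.2.2.1, by rw [hlen]; omega⟩
      obtain ⟨s1, s2⟩ := pvStep p L n e.1 e.2 hI hK ha hb
      have hlen' : (pvUnionA p e.1 e.2).length = n.toNat := by
        rw [(pvUnion_spec p e.1 e.2 hI ha hb).1, hlen]
      exact ih (pvUnionA p e.1 e.2) _ s1 s2 hlen'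
    · rw [if_neg hval, if_neg hval]
      exact ih p L hI hK hlen

lemma pvGroupA (xs : List Int) : ∀ (p : List Int) (d : PySem.Dict Int (List Int)),
    pvInv p → (∀ i ∈ xs, pvRng p i) →
    (xs.foldl (fun (st : PySem.Dict Int (List Int) × List Int) i =>
      let fr := pvFindA (st.2.length + 1) st.2 i
      (st.1.modify fr.1 [] (fun g => g ++ [i]), fr.2)) (d, p)).1
    = xs.foldl (fun dd i => dd.modify (pvRoot p i) [] (fun g => g ++ [i])) d := by
  induction xs with
  | nil => intro p d _ _; rfl
  | cons i xs ih =>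
    intro p d hI hxs
    rw [List.foldl_cons, List.foldl_cons]
    have hi : pvRng p i := hxs i ((by simp : _ ∈ _))
    obtain ⟨f1, f2, f3, f4⟩ := pvFind_spec p.length p i (p.length + 1) hI hi
      (pvSteps_le_len p i hI.1 hi _) (by omega)
    simp only
    rw [f1]
    have hxs' : ∀ j ∈ xs, pvRng (pvFindA (p.length + 1) p i).2 j := by
      intro j hj
      have := hxs j (List.mem_cons_of_mem i hj)
      unfold pvRng
      rw [f2]
      exact this
    rw [ih (pvFindA (p.length + 1) p i).2 _ f3 hxs']
    apply PySem.List.foldl_congr_mem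
    intro acc x hx
    rw [f4 x (hxs x (List.mem_cons_of_mem i hx))]

-- dict position helpers
lemma pvGetPos (l : List (Int × List Int)) : ∀ (m : Nat) (k : Int) (val : List Int),
    (l.map Prod.fst).Nodup → l[m]? = some (k, val) →
    (PySem.Dict.mk l).get? k = some val := by
  induction l with
  | nil => intro m k val _ h; simp at h
  | cons hd tl ih =>
    intro m k val hnd h
    rw [PySem.Dict.get?_mk_cons]
    match m with
    | 0 =>
      simp only [List.getElem?_cons_zero, Option.some.injEq] at h
      subst h
      simp
    | m+1 =>
      simp only [List.getElem?_cons_succ] at h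
      have hk : k ∈ tl.map Prod.fst := by
        rw [List.mem_map]
        exact ⟨(k, val), List.mem_of_getElem? h, rfl⟩
      have hhd : ¬ (hd.1 == k) = true := by
        simp only [List.map_cons, List.nodup_cons] at hnd
        intro hc
        exact hnd.1 ((beq_iff_eq.mp hc) ▸ hk)
      rw [if_neg hhd]
      exact ih m k val (by simp only [List.map_cons, List.nodup_cons] at hnd; exact hnd.2) h

lemma pvContainsIff (d : PySem.Dict Int (List Int)) (k : Int) :
    d.contains k = true ↔ ∃ m : Nat, d.items[m]?.map Prod.fst = some k := by
  simp only [PySem.Dict.contains, List.any_eq_true, beq_iff_eq]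
  constructor
  · rintro ⟨pr, hmem, heq⟩
    obtain ⟨m, hm⟩ := List.mem_iff_getElem?.mp hmem
    exact ⟨m, by rw [hm]; simp [heq]⟩
  · rintro ⟨m, hm⟩
    match hpr : d.items[m]? with
    | none => rw [hpr] at hm; simp at hm
    | some pr =>
      rw [hpr] at hm
      simp only [Option.map_some, Option.some.injEq] at hm
      exact ⟨pr, List.mem_of_getElem? hpr, hm⟩

lemma pvFoldModifyValues (K₁ K₂ : Int → Int) (xs : List Int)
    (hK : ∀ i ∈ xs, ∀ j ∈ xs, (K₁ i = K₁ j ↔ K₂ i = K₂ j)) :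
    ∀ (d₁ d₂ : PySem.Dict Int (List Int)),
    (d₁.items.map Prod.fst).Nodup → (d₂.items.map Prod.fst).Nodup →
    d₁.items.length = d₂.items.length →
    (∀ m : Nat, d₁.items[m]?.map Prod.snd = d₂.items[m]?.map Prod.snd) →
    (∀ i ∈ xs, ∀ m : Nat, (d₁.items[m]?.map Prod.fst = some (K₁ i) ↔ d₂.items[m]?.map Prod.fst = some (K₂ i))) →
    (xs.foldl (fun d i => d.modify (K₁ i) [] (fun g => g ++ [i])) d₁).values
    = (xs.foldl (fun d i => d.modify (K₂ i) [] (fun g => g ++ [i])) d₂).values := by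
  induction xs with
  | nil =>
    intro d₁ d₂ _ _ _ hvals _
    simp only [List.foldl_nil, PySem.Dict.values]
    apply List.ext_getElem?
    intro m
    rw [List.getElem?_map, List.getElem?_map]
    exact hvals m
  | cons i xs ih =>
    intro d₁ d₂ hnd₁ hnd₂ hlen hvals hlink
    rw [List.foldl_cons, List.foldl_cons]
    have hKx : ∀ a ∈ xs, ∀ b ∈ xs, (K₁ a = K₁ b ↔ K₂ a = K₂ b) := fun a ha b hb =>
      hK a (List.mem_cons_of_mem i ha) b (List.mem_cons_of_mem i hb)
    have hcont : d₁.contains (K₁ i) = true ↔ d₂.contains (K₂ i) = true := by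
      rw [pvContainsIff, pvContainsIff]
      constructor
      · rintro ⟨m, hm⟩; exact ⟨m, (hlink i ((by simp : _ ∈ _)) m).mp hm⟩
      · rintro ⟨m, hm⟩; exact ⟨m, (hlink i ((by simp : _ ∈ _)) m).mpr hm⟩
    simp only [PySem.Dict.modify]
    by_cases hc : d₁.contains (K₁ i) = true
    · have hc₂ : d₂.contains (K₂ i) = true := hcont.mp hc
      -- the stored value at the key is the same in both dicts
      obtain ⟨m, hm⟩ := (pvContainsIff d₁ (K₁ i)).mp hc
      match hit : d₁.items[m]? with
      | none => rw [hit] at hm; simp at hm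
      | some pr =>
        rw [hit] at hm
        simp only [Option.map_some, Option.some.injEq] at hm
        match hit₂ : d₂.items[m]? with
        | none =>
          have hvv := hvals m
          rw [hit, hit₂] at hvv
          simp at hvv
        | some pr₂ =>
          have hk₂ : pr₂.1 = K₂ i := by
            have := (hlink i (by simp : _ ∈ _) m).mp (by rw [hit]; simp [hm])
            rw [hit₂] at this
            simpa using this
          have hv₂ : pr.2 = pr₂.2 := by
            have := hvals m
            rw [hit, hit₂] at this
            simpa using this
          have hget₁ : d₁.get? (K₁ i) = some pr.2 := by
            have h' : d₁.items[m]? = some (K₁ i, pr.2) := by rw [hit, ← hm]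
            exact pvGetPos d₁.items m (K₁ i) pr.2 hnd₁ h'
          have hget₂ : d₂.get? (K₂ i) = some pr₂.2 := by
            have h' : d₂.items[m]? = some (K₂ i, pr₂.2) := by rw [hit₂, ← hk₂]
            exact pvGetPos d₂.items m (K₂ i) pr₂.2 hnd₂ h'
          have hgd₁ : d₁.getD (K₁ i) [] = pr.2 := by
            show (d₁.get? (K₁ i)).getD [] = pr.2
            rw [hget₁, Option.getD_some]
          have hgd₂ : d₂.getD (K₂ i) [] = pr.2 := by
            show (d₂.get? (K₂ i)).getD [] = pr.2
            rw [hget₂, Option.getD_some, ← hv₂]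
          rw [hgd₁, hgd₂]
          apply ih hKx
          · rw [PySem.Dict.items_insert_of_contains d₁ _ hc]
            have : (List.map Prod.fst (List.map (fun p => if (p.1 == K₁ i) = true then (K₁ i, pr.2 ++ [i]) else p) d₁.items)) = d₁.items.map Prod.fst := by
              rw [List.map_map]
              apply List.map_congr_left
              intro a _
              simp only [Function.comp_apply]
              split_ifs with hb
              · simp [beq_iff_eq.mp hb]
              · rfl
            rw [this]
            exact hnd₁
          · rw [PySem.Dict.items_insert_of_contains d₂ _ hc₂]
            have : (List.map Prod.fst (List.map (fun p => if (p.1 == K₂ i) = true then (K₂ i, pr.2 ++ [i]) else p) d₂.items)) = d₂.items.map Prod.fst := by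
              rw [List.map_map]
              apply List.map_congr_left
              intro a _
              simp only [Function.comp_apply]
              split_ifs with hb
              · simp [beq_iff_eq.mp hb]
              · rfl
            rw [this]
            exact hnd₂
          · rw [PySem.Dict.items_insert_of_contains d₁ _ hc,
              PySem.Dict.items_insert_of_contains d₂ _ hc₂]
            simp only [List.length_map]
            exact hlen
          · intro m'
            rw [PySem.Dict.items_insert_of_contains d₁ _ hc,
              PySem.Dict.items_insert_of_contains d₂ _ hc₂]
            rw [List.getElem?_map, List.getElem?_map]
            have hlk := hlink i (by simp : _ ∈ _) m'
            have hvv := hvals m'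
            match h1' : d₁.items[m']?, h2' : d₂.items[m']? with
            | none, none => simp
            | none, some q₂ => rw [h1', h2'] at hvv; simp at hvv
            | some q₁, none => rw [h1', h2'] at hvv; simp at hvv
            | some q₁, some q₂ =>
              rw [h1', h2'] at hvv hlk
              simp only [Option.map_some, Option.some.injEq] at hvv hlk ⊢
              by_cases hq1 : q₁.1 = K₁ i
              · have hq2 : q₂.1 = K₂ i := hlk.mp hq1
                simp [hq1, hq2]
              · have hq2 : ¬ q₂.1 = K₂ i := fun hcon => hq1 (hlk.mpr hcon)
                simp only [hq1, hq2, beq_iff_eq]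
                exact hvv
          · intro a ha m'
            rw [PySem.Dict.items_insert_of_contains d₁ _ hc,
              PySem.Dict.items_insert_of_contains d₂ _ hc₂]
            rw [List.getElem?_map, List.getElem?_map]
            have hlka := hlink a (List.mem_cons_of_mem i ha) m'
            have hlki := hlink i (by simp : _ ∈ _) m'
            have hKia := hK i (by simp : _ ∈ _) a (List.mem_cons_of_mem i ha)
            match h1' : d₁.items[m']?, h2' : d₂.items[m']? with
            | none, none => simp
            | none, some q₂ =>
              have hvv := hvals m'
              rw [h1', h2'] at hvv
              simp at hvv
            | some q₁, none =>
              have hvv := hvals m'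
              rw [h1', h2'] at hvv
              simp at hvv
            | some q₁, some q₂ =>
              rw [h1', h2'] at hlka hlki
              simp only [Option.map_some, Option.some.injEq] at hlka hlki ⊢
              by_cases hq1 : q₁.1 = K₁ i
              · have hq2 : q₂.1 = K₂ i := hlki.mp hq1
                simp only [hq1, hq2, beq_self_eq_true, if_pos]
                exact hKia
              · have hq2 : ¬ q₂.1 = K₂ i := fun hcon => hq1 (hlki.mpr hcon)
                simp only [beq_iff_eq, if_neg hq1, if_neg hq2]
                exact hlka
    · have hc₂ : ¬ d₂.contains (K₂ i) = true := fun h => hc (hcont.mpr h)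
      have hcb : d₁.contains (K₁ i) = false := by simp [hc]
      have hcb₂ : d₂.contains (K₂ i) = false := by simp [hc₂]
      have hgd₁ : d₁.getD (K₁ i) [] = [] := by
        simp [PySem.Dict.getD, (PySem.Dict.get?_eq_none_iff_contains d₁ _).mpr hcb]
      have hgd₂ : d₂.getD (K₂ i) [] = [] := by
        simp [PySem.Dict.getD, (PySem.Dict.get?_eq_none_iff_contains d₂ _).mpr hcb₂]
      rw [hgd₁, hgd₂]
      apply ih hKx
      · rw [PySem.Dict.items_insert_of_not_contains d₁ _ hcb, List.map_append, List.nodup_append]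
        refine ⟨hnd₁, by simp, ?_⟩
        intro w hw1 b hb2
        simp only [List.map_cons, List.map_nil, List.mem_singleton] at hb2
        subst hb2
        intro hwk
        apply hc
        rw [PySem.Dict.contains_iff_mem_keys]
        exact hwk ▸ hw1
      · rw [PySem.Dict.items_insert_of_not_contains d₂ _ hcb₂, List.map_append, List.nodup_append]
        refine ⟨hnd₂, by simp, ?_⟩
        intro w hw1 b hb2
        simp only [List.map_cons, List.map_nil, List.mem_singleton] at hb2
        subst hb2
        intro hwk
        apply hc₂
        rw [PySem.Dict.contains_iff_mem_keys]
        exact hwk ▸ hw1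
      · rw [PySem.Dict.items_insert_of_not_contains d₁ _ hcb,
          PySem.Dict.items_insert_of_not_contains d₂ _ hcb₂]
        simp [hlen]
      · intro m'
        rw [PySem.Dict.items_insert_of_not_contains d₁ _ hcb,
          PySem.Dict.items_insert_of_not_contains d₂ _ hcb₂]
        rcases Nat.lt_trichotomy m' d₁.items.length with hm' | hm' | hm'
        · rw [List.getElem?_append_left hm', List.getElem?_append_left (hlen ▸ hm')]
          exact hvals m'
        · have e1 : m' - d₁.items.length = 0 := by omega
          have e2 : m' - d₂.items.length = 0 := by omega
          rw [List.getElem?_append_right (by omega), List.getElem?_append_right (by omega), e1, e2]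
          simp
        · rw [List.getElem?_append_right (by omega), List.getElem?_append_right (by omega)]
          rw [List.getElem?_eq_none (by simp; omega), List.getElem?_eq_none (by simp; omega)]
      · intro a ha m'
        rw [PySem.Dict.items_insert_of_not_contains d₁ _ hcb,
          PySem.Dict.items_insert_of_not_contains d₂ _ hcb₂]
        have hKia := hK i (by simp : _ ∈ _) a (List.mem_cons_of_mem i ha)
        rcases Nat.lt_trichotomy m' d₁.items.length with hm' | hm' | hm'
        · rw [List.getElem?_append_left hm', List.getElem?_append_left (hlen ▸ hm')]
          exact hlink a (List.mem_cons_of_mem i ha) m'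
        · have e1 : m' - d₁.items.length = 0 := by omega
          have e2 : m' - d₂.items.length = 0 := by omega
          rw [List.getElem?_append_right (by omega), List.getElem?_append_right (by omega), e1, e2]
          simp only [List.getElem?_cons_zero, Option.map_some, Option.some.injEq]
          exact hKia
        · rw [List.getElem?_append_right (by omega), List.getElem?_append_right (by omega)]
          rw [List.getElem?_eq_none (by simp; omega), List.getElem?_eq_none (by simp; omega)]
          simp

lemma pvInit_get (n : Int) (d x : Int) (hx : pvRng (PySem.List.pyRange 0 n 1) x) :
    PySem.List.pyGetD (PySem.List.pyRange 0 n 1) x d = x := by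
  obtain ⟨hx0, hx1⟩ := hx
  unfold PySem.List.pyGetD
  rw [PySem.List.pyGet?_of_nonneg _ hx0]
  have hlen : (PySem.List.pyRange 0 n 1).length = (n - 0).toNat := PySem.List.length_pyRange_one 0 n
  have hxl : x.toNat < (n - 0).toNat := by omega
  rw [PySem.List.getElem?_pyRange_one, if_pos hxl]
  simp
  omega

lemma pvInit (n : Int) : pvInv (PySem.List.pyRange 0 n 1) ∧
    pvKeyInv (PySem.List.pyRange 0 n 1) (PySem.List.pyRange 0 n 1) ∧
    (PySem.List.pyRange 0 n 1).length = n.toNat := by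
  have hpar : ∀ x, pvRng (PySem.List.pyRange 0 n 1) x → pvPar (PySem.List.pyRange 0 n 1) x = x :=
    fun x hx => pvInit_get n x x hx
  have hlen : (PySem.List.pyRange 0 n 1).length = (n - 0).toNat := PySem.List.length_pyRange_one 0 n
  refine ⟨⟨fun x hx => by rw [hpar x hx]; exact hx,
           fun x hx => by rw [pvRoot_of_fix _ x (hpar x hx)]; exact hpar x hx⟩,
         ⟨rfl, ?_⟩, by omega⟩
  intro i j hi hj
  rw [pvRoot_of_fix _ i (hpar i hi), pvRoot_of_fix _ j (hpar j hj)]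
  unfold pvLab
  rw [pvInit_get n 0 i hi, pvInit_get n 0 j hj]

lemma pvFinal (n : Int) (p L : List Int) (hI : pvInv p) (hK : pvKeyInv p L)
    (hlen : p.length = n.toNat) :
    ((PySem.List.pyRange 0 n 1).foldl (fun (st : PySem.Dict Int (List Int) × List Int) i =>
        let fr := pvFindA (st.2.length + 1) st.2 i
        (st.1.modify fr.1 [] (fun g => g ++ [i]), fr.2)) (PySem.Dict.empty, p)).1.values
    = ((PySem.List.enumerate L).foldl
        (fun (d : PySem.Dict Int (List Int)) il => d.modify il.2 [] (fun g => g ++ [il.1]))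
        PySem.Dict.empty).values := by
  have hmem : ∀ i ∈ PySem.List.pyRange 0 n 1, pvRng p i := by
    intro i hi
    rw [PySem.List.mem_pyRange_one] at hi
    exact ⟨hi.1, by rw [hlen]; omega⟩
  rw [pvGroupA (PySem.List.pyRange 0 n 1) p PySem.Dict.empty hI hmem]
  rw [PySem.List.enumerate_eq_map_pyRange L 0, List.foldl_map]
  have hRL : PySem.List.pyRange 0 (PySem.List.len L) 1 = PySem.List.pyRange 0 n 1 := by
    rw [PySem.List.pyRange_one, PySem.List.pyRange_one]
    have h1 : L.length = p.length := hK.1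
    have h2 : ((PySem.List.len L) - 0).toNat = (n - 0).toNat := by
      simp only [PySem.List.len]
      omega
    rw [h2]
  rw [hRL]
  apply pvFoldModifyValues (fun i => pvRoot p i) (fun i => PySem.List.pyGetD L i 0)
    (PySem.List.pyRange 0 n 1) ?_ PySem.Dict.empty PySem.Dict.empty
    (by simp [PySem.Dict.empty]) (by simp [PySem.Dict.empty]) rfl
    (fun m => rfl) (fun i _ m => by simp [PySem.Dict.empty])
  intro i hi j hj
  rw [PySem.List.mem_pyRange_one] at hi hj
  exact hK.2 i j ⟨hi.1, by rw [hlen]; omega⟩ ⟨hj.1, by rw [hlen]; omega⟩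

-- ===== VERDICT (by name: the statement is the Claim_ definition above) =====
theorem linked_factor_groups_spec : Claim_equal_linked_factor_groups := by
  intro n sf hDom hPre
  show linked_factor_groups n sf = linked_factor_groups_alt n sf
  obtain ⟨hI0, hK0, hlen0⟩ := pvInit n
  unfold linked_factor_groups linked_factor_groups_alt
  cases sf with
  | none =>
    exact pvFinal n _ _ hI0 hK0 hlen0
  | some l =>
    by_cases hl : l = []
    · simp only [if_pos hl]
      exact pvFinal n _ _ hI0 hK0 hlen0
    · simp only [if_neg hl]
      obtain ⟨hIe, hlene, hKe⟩ := pvEdges n l _ _ hI0 hK0 hlen0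
      exact pvFinal n _ _ hIe hKe hlene
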